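-- pv_equiv track=rewrite | github.com/Asutherland8219/TMU_assignments | Source/midterm.py | greeting
-- ===== SOURCE A (Python) =====
-- def greeting(value):
--     # value check to make sure it is correct type
--     value = int(value)
--
--     time_range = [{"Good Morning" :  [600, 1159 ] },
--                     {"Good Afternoon" : [1200, 1759]},
--                     {"Good Evening"   : [1800, 2100]}
--     ]
--
--     greet = "Good Day"
--
--     for time_frame in time_range:
--         for t in time_frame.items():
--             time_range = range(t[1][0], t[1][1])
--             if value in time_range:
--                 greet = t[0]
--
--     return greet
-- ===== SOURCE B (Python) =====
-- def greeting(value):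
--     value = int(value)
--     if 600 <= value < 1159:
--         return "Good Morning"
--     elif 1200 <= value < 1759:
--         return "Good Afternoon"
--     elif 1800 <= value < 2100:
--         return "Good Evening"
--     else:
--         return "Good Day"
-- ===== Notes on version B (the rewrite author's own statement) =====
-- stated objective: simpler
-- what changed: Replaced the list-of-dicts table with its nested loop and range-membership test by a direct if/elif chain of interval comparisons returning immediately.
import Mathlib
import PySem

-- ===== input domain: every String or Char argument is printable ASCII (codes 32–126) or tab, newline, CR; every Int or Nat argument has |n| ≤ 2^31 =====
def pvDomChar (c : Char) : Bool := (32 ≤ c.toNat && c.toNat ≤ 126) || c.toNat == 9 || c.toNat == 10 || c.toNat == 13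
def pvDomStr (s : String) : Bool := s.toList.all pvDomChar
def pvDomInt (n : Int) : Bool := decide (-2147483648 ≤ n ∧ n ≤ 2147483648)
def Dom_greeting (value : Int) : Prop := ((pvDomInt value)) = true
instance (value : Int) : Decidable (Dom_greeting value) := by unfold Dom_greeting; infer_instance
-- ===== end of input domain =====

-- B replaces the table-of-dicts and nested loop by a direct if/elif chain (simpler).

-- ===== PORT A =====
-- A's table: a list of one-entry dicts mapping greeting → [lo, hi];
-- the nested loop folds over the table and over each dict's items,
-- testing 'value in range(lo, hi)' (lo ≤ value < hi) and overwriting greet.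
def greeting (value : Int) : String :=
  let time_range : List (PySem.Dict String (Int × Int)) :=
    [PySem.Dict.ofList [("Good Morning", (600, 1159))],
     PySem.Dict.ofList [("Good Afternoon", (1200, 1759))],
     PySem.Dict.ofList [("Good Evening", (1800, 2100))]]
  time_range.foldl (fun greet time_frame =>
    time_frame.items.foldl (fun greet t =>
      if t.2.1 ≤ value ∧ value < t.2.2 then t.1 else greet) greet) "Good Day"

-- ===== PORT B =====
def greeting_alt (value : Int) : String :=
  if 600 ≤ value ∧ value < 1159 then "Good Morning"
  else if 1200 ≤ value ∧ value < 1759 then "Good Afternoon"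
  else if 1800 ≤ value ∧ value < 2100 then "Good Evening"
  else "Good Day"

-- ===== PRECONDITION & SPEC =====
def Spec_greeting (value : Int) (out : String) : Prop := out = greeting_alt value
instance (value : Int) (out : String) : Decidable (Spec_greeting value out) := by unfold Spec_greeting; infer_instance

-- ===== CLAIM (what is proved, stated in full; the proofs are below) =====
def Claim_equal_greeting : Prop := ∀ (value : Int), Dom_greeting value → Spec_greeting value (greeting value)

-- ===== LEMMAS AND PROOFS =====

-- ===== VERDICT (by name: the statement is the Claim_ definition above) =====
theorem greeting_spec : Claim_equal_greeting := by
  intro v _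
  unfold Spec_greeting greeting greeting_alt
  have h1 : ∀ (k : String) (p : Int × Int),
      (PySem.Dict.ofList [(k, p)]).items = [(k, p)] := by intro k p; rfl
  simp only [h1, List.foldl]
  split_ifs <;> first | rfl | omega
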